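-- pv_equiv track=rewrite | github.com/rotweinur/Practise_15 | task_19.py | count
-- ===== SOURCE A (Python) =====
-- def count(a: int, b: int) -> int:
--     """Return the number of squares that can be cut from a rectangle of size a x b,
--     always cutting the largest possible square.
--
--     :param a: length of the rectangle (positive integer)
--     :param b: width of the rectangle (positive integer)
--     :return: total number of squares cut
--     :raises TypeError: if a or b are not integers
--     :raises ValueError: if a < 0 or b < 0
--     """
--     if not isinstance(a, int) or not isinstance(b, int):
--         raise TypeError("a and b must be integers")
--     if a < 0 or b < 0:
--         raise ValueError("a and b must be non-negative integers")
--
--     if a < b: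
--         a, b = b, a
--
--     if b == 0:
--         return 0
--
--     num_squares = a // b
--     remainder = a % b
--
--     return num_squares + count(b, remainder)
-- ===== SOURCE B (Python) =====
-- def count(a: int, b: int) -> int:
--     """Iterative re-implementation: same validation, then an accumulating
--     Euclidean loop (no swap needed: when a < b, a//b == 0 and the rotation
--     (a, b) = (b, a % b) performs the swap for free)."""
--     if not isinstance(a, int) or not isinstance(b, int):
--         raise TypeError("a and b must be integers")
--     if a < 0 or b < 0:
--         raise ValueError("a and b must be non-negative integers")
--     total = 0
--     while b:
--         total += a // b
--         a, b = b, a % b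
--     return total
-- ===== Notes on version B (the rewrite author's own statement) =====
-- stated objective: simpler
-- what changed: Replaced the recursive swap-then-recurse Euclidean count with a single iterative accumulator loop that needs no swap (when a < b the quotient is 0 and the rotation (a,b)=(b,a%b) swaps for free).
import Mathlib
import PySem

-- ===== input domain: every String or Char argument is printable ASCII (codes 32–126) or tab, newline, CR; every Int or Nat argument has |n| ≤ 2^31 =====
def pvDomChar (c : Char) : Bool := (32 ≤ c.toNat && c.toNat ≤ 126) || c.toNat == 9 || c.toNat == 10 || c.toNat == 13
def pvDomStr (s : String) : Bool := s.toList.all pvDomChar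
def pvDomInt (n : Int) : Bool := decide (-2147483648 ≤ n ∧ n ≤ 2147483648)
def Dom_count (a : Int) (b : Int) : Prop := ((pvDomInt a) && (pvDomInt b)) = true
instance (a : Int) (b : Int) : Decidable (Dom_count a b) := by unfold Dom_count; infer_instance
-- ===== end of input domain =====

-- B replaces A's recursive swap-then-recurse Euclidean square count by a single
-- iterative accumulator loop with no swap (objective: simpler).


-- ===== PORT A =====
-- Literal port of A: the ValueError branch (a < 0 or b < 0) is excluded by
-- Pre_count and returns an arbitrary 0 here; the 'a, b = b, a' swap is written
-- as the two symmetric branches of 'if a < b'.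
def count (a : Int) (b : Int) : Int :=
  if a < 0 ∨ b < 0 then 0          -- Python raises ValueError here (outside Pre_count)
  else if a < b then               -- swapped: work on (b, a)
    if a = 0 then 0
    else PySem.Int.floordiv b a + count a (PySem.Int.mod b a)
  else
    if b = 0 then 0
    else PySem.Int.floordiv a b + count b (PySem.Int.mod a b)
termination_by b.toNat
decreasing_by
  · have h := PySem.Int.mod_eq_emod_of_pos (a:=b) (b:=a) (by omega)
    have h3 := Int.emod_lt_of_pos b (show (0:Int) < a by omega)
    omega
  · have h := PySem.Int.mod_eq_emod_of_pos (a:=a) (b:=b) (by omega)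
    have h3 := Int.emod_lt_of_pos a (show (0:Int) < b by omega)
    omega

-- ===== PORT B =====
-- The 'while b:' loop of Source B; b stays ≥ 0 on every input count_alt passes in,
-- so the 'b ≤ 0' exit test is exact for Python's 'while b'.
def countAltGo (a : Int) (b : Int) (total : Int) : Int :=
  if b ≤ 0 then total
  else countAltGo b (PySem.Int.mod a b) (total + PySem.Int.floordiv a b)
termination_by b.toNat
decreasing_by
  have h := PySem.Int.mod_eq_emod_of_pos (a:=a) (b:=b) (by omega)
  have h3 := Int.emod_lt_of_pos a (show (0:Int) < b by omega)
  omega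

def count_alt (a : Int) (b : Int) : Int :=
  if a < 0 ∨ b < 0 then 0          -- Python raises ValueError here (outside Pre_count)
  else countAltGo a b 0

-- ===== PRECONDITION & SPEC =====
-- Pre_count excludes exactly the inputs where Python A raises ValueError (a < 0 or b < 0).
def Pre_count (a : Int) (b : Int) : Prop := 0 ≤ a ∧ 0 ≤ b
instance (a : Int) (b : Int) : Decidable (Pre_count a b) := by unfold Pre_count; infer_instance

def pvWitness_count : Int × Int := (6, 4)

def Spec_count (a : Int) (b : Int) (out : Int) : Prop := out = count_alt a b
instance (a : Int) (b : Int) (out : Int) : Decidable (Spec_count a b out) := by unfold Spec_count; infer_instance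

-- ===== CLAIM (what is proved, stated in full; the proofs are below) =====
def Claim_equal_count : Prop := ∀ (a : Int) (b : Int), Dom_count a b → Pre_count a b → Spec_count a b (count a b)

-- ===== LEMMAS AND PROOFS =====

lemma floordiv_of_lt {a b : Int} (ha : 0 ≤ a) (hab : a < b) :
    PySem.Int.floordiv a b = 0 := by
  rw [PySem.Int.floordiv_eq_ediv_of_pos (a:=a) (b:=b) (by omega)]
  exact Int.ediv_eq_zero_of_lt ha hab

lemma mod_of_lt {a b : Int} (ha : 0 ≤ a) (hab : a < b) :
    PySem.Int.mod a b = a := by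
  rw [PySem.Int.mod_eq_emod_of_pos (a:=a) (b:=b) (by omega)]
  exact Int.emod_eq_of_lt ha hab

lemma go_eq_count (n : Nat) : ∀ (a b t : Int), 0 ≤ a → 0 ≤ b → b.toNat ≤ n →
    countAltGo a b t = t + count a b := by
  induction n with
  | zero =>
    intro a b t ha hb hn
    have hb0 : b = 0 := by omega
    subst hb0
    rw [countAltGo, count]
    simp [show ¬ a < (0:Int) by omega]
  | succ n ih =>
    intro a b t ha hb hn
    rcases eq_or_lt_of_le hb with hb0 | hbpos
    · subst hb0
      rw [countAltGo, count]
      simp [show ¬ a < (0:Int) by omega]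
    · have hmod_nn : 0 ≤ PySem.Int.mod a b := by
        rw [PySem.Int.mod_eq_emod_of_pos (a:=a) (b:=b) hbpos]
        exact Int.emod_nonneg a (by omega)
      have hmod_lt : PySem.Int.mod a b < b := by
        rw [PySem.Int.mod_eq_emod_of_pos (a:=a) (b:=b) hbpos]
        exact Int.emod_lt_of_pos a hbpos
      rw [countAltGo]
      simp only [show ¬ b ≤ 0 by omega, if_false]
      by_cases hab : a < b
      · -- a < b: the quotient is 0 and the rotation swaps the pair
        rw [floordiv_of_lt ha hab, mod_of_lt ha hab]
        rw [ih b a (t + 0) (by omega) ha (by omega)]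
        -- count b a = count a b here: both reduce to the same expression
        have hsym : count b a = count a b := by
          conv_lhs => rw [count]
          conv_rhs => rw [count]
          simp [show ¬(b < 0 ∨ a < 0) by omega, show ¬ b < a by omega,
            show a < b from hab, show ¬(a < 0 ∨ b < 0) by omega]
        rw [hsym]; ring
      · rw [ih b (PySem.Int.mod a b) _ (by omega) hmod_nn (by omega)]
        conv_rhs => rw [count]
        simp only [show ¬(a < 0 ∨ b < 0) by omega, if_false,
          show ¬ a < b from hab, if_false, show ¬ b = 0 by omega]
        ring

-- ===== VERDICT (by name: the statement is the Claim_ definition above) =====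
theorem count_spec : Claim_equal_count := by
  intro a b _ hpre
  obtain ⟨ha, hb⟩ := hpre
  unfold Spec_count count_alt
  rw [if_neg (by omega)]
  rw [go_eq_count b.toNat a b 0 ha hb le_rfl]
  ring
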